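-- pv_equiv track=rewrite | github.com/rayymus/SoW-Compiler | main.py | extract_subject_sections
-- ===== SOURCE A (Python) =====
-- def extract_subject_sections(text: str, subjects: list[str]) -> dict[str, str]:
--     subject_map = {s.lower(): s for s in subjects}
--     sections = {s: [] for s in subjects}
--     current = None
--     for line in text.splitlines():
--         line_norm = line.strip().lower()
--         matched = None
--         for subject_norm, subject in subject_map.items():
--             if subject_norm and subject_norm in line_norm:
--                 matched = subject
--                 break
--         if matched:
--             current = matched
--         if current:
--             sections[current].append(line)
--     return {subject: "\n".join(lines).strip() for subject, lines in sections.items()}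
-- ===== SOURCE B (Python) =====
-- # B: split the line list into tagged segments at matching lines (recursive split,
-- # no running "current subject" state), then bucket the pre-joined segments per subject.
-- def extract_subject_sections(text: str, subjects: list[str]) -> dict[str, str]:
--     canon = {s.lower(): s for s in subjects}
--
--     def label(line):
--         s = line.strip().lower()
--         return next((subj for key, subj in canon.items() if key and key in s), None)
--
--     def chunks(lines):
--         # drop unmatched prefix, take one segment (leader + unmatched followers), recurse
--         while lines and label(lines[0]) is None:
--             lines = lines[1:]
--         if not lines:
--             return []
--         head, rest = lines[0], lines[1:]
--         body = []
--         while rest and label(rest[0]) is None: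
--             body.append(rest[0])
--             rest = rest[1:]
--         return [(label(head), [head] + body)] + chunks(rest)
--
--     parts = {s: [] for s in subjects}
--     for subj, seg in chunks(text.splitlines()):
--         parts[subj].append("\n".join(seg))
--     return {s: "\n".join(parts[s]).strip() for s in subjects}
-- ===== Notes on version B (the rewrite author's own statement) =====
-- stated objective: alternative
-- what changed: A's single stateful scan carrying a 'current' subject and appending each line into a pre-built per-subject dict is replaced by a recursive split of the line list into tagged segments at matching lines (leader line + unmatched followers), which are pre-joined and then bucketed per subject.
import Mathlib
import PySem

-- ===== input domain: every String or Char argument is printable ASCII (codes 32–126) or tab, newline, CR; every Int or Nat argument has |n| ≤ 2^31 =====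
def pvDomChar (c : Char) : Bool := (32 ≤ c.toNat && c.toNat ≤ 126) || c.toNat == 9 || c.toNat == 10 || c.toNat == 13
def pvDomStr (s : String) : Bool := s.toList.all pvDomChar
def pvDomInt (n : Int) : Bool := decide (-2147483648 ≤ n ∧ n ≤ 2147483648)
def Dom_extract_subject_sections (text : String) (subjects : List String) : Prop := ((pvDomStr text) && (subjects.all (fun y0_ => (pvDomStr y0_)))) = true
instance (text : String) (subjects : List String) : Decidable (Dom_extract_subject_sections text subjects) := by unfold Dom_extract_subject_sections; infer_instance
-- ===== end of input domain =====

-- B replaces A's single stateful scan (a running 'current' subject appending into a pre-built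
-- per-subject dict) by a recursive split of the line list into tagged segments at matching
-- lines, which are pre-joined and then bucketed per subject; same result ('alternative').

-- ===== PORT A =====
-- A's inner 'for subject_norm, subject in subject_map.items(): … break' loop
def pvFirstMatchA : List (String × String) → String → Option String
  | [], _ => none
  | (k, v) :: rest, ln =>
      if k != "" && PySem.Str.isIn k ln then some v else pvFirstMatchA rest ln

-- the body of A's 'for line in text.splitlines()' loop; state = (sections, current)
def pvStepA (items : List (String × String))
    (st : PySem.Dict String (List String) × Option String) (line : String) :
    PySem.Dict String (List String) × Option String :=
  let line_norm := PySem.Str.lower (PySem.Str.strip line)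
  let matched := pvFirstMatchA items line_norm
  let current := match matched with | some mtc => some mtc | none => st.2
  match current with
  | some c => (st.1.modify c [] (fun ls => ls ++ [line]), current)   -- sections[current].append(line); key always present
  | none => (st.1, current)

def extract_subject_sections (text : String) (subjects : List String) : List (String × String) :=
  let subject_map : PySem.Dict String String :=
    subjects.foldl (fun d s => d.insert (PySem.Str.lower s) s) PySem.Dict.empty
  let sections : PySem.Dict String (List String) :=
    subjects.foldl (fun d s => d.insert s []) PySem.Dict.empty
  let final := (PySem.Str.splitlines text).foldl (pvStepA subject_map.items) (sections, none)
  final.1.items.map (fun p => (p.1, PySem.Str.strip (PySem.Str.join "\n" p.2)))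

-- ===== PORT B =====
-- B's label(line): next((subj for key, subj in canon.items() if key and key in line.strip().lower()), None)
def pvLabelB (items : List (String × String)) (line : String) : Option String :=
  (items.find? (fun p =>
      p.1 != "" && PySem.Str.isIn p.1 (PySem.Str.lower (PySem.Str.strip line)))).map (·.2)

-- B's chunks(lines): drop the unmatched prefix, take one segment (leader + unmatched
-- followers), recurse on the remainder
def pvChunks (lab : String → Option String) (lines : List String) : List (String × List String) :=
  match h : lines.dropWhile (fun l => (lab l).isNone) with
  | [] => []
  | head :: rest =>
      ((lab head).getD "", head :: rest.takeWhile (fun l => (lab l).isNone))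
        :: pvChunks lab (rest.dropWhile (fun l => (lab l).isNone))
termination_by lines.length
decreasing_by
  have h1 : (rest.dropWhile (fun l => (lab l).isNone)).length ≤ rest.length :=
    List.length_dropWhile_le ..
  have h2 : (head :: rest).length ≤ lines.length := by
    rw [← h]; exact List.length_dropWhile_le ..
  simp only [List.length_cons] at h2
  omega

def extract_subject_sections_alt (text : String) (subjects : List String) : List (String × String) :=
  let canon : PySem.Dict String String :=
    subjects.foldl (fun d s => d.insert (PySem.Str.lower s) s) PySem.Dict.empty
  let chs := pvChunks (pvLabelB canon.items) (PySem.Str.splitlines text)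
  -- parts = {s: [] for s in subjects}; for subj, seg in chunks: parts[subj].append("\n".join(seg))
  let parts := chs.foldl
    (fun d c => d.modify c.1 [] (fun ls => ls ++ [PySem.Str.join "\n" c.2]))
    (subjects.foldl (fun d s => d.insert s []) PySem.Dict.empty)
  (subjects.foldl (fun d s =>
      d.insert s (PySem.Str.strip (PySem.Str.join "\n" (parts.getD s []))))
    PySem.Dict.empty).items

-- ===== PRECONDITION & SPEC =====
def Spec_extract_subject_sections (text : String) (subjects : List String) (out : List (String × String)) : Prop := out = extract_subject_sections_alt text subjects
instance (text : String) (subjects : List String) (out : List (String × String)) : Decidable (Spec_extract_subject_sections text subjects out) := by unfold Spec_extract_subject_sections; infer_instance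

-- ===== CLAIM (what is proved, stated in full; the proofs are below) =====
def Claim_equal_extract_subject_sections : Prop := ∀ (text : String) (subjects : List String), Dom_extract_subject_sections text subjects → Spec_extract_subject_sections text subjects (extract_subject_sections text subjects)

-- ===== LEMMAS AND PROOFS =====

-- 'carry the current subject' update
def pvUpd (cur lab : Option String) : Option String :=
  match lab with | some _ => lab | none => cur

-- lines paired with their forward-filled labels (a characterisation of A's scan)
def pvFill (m : String → Option String) : Option String → List String → List (String × Option String)
  | _, [] => []
  | cur, l :: ls => (l, pvUpd cur (m l)) :: pvFill m (pvUpd cur (m l)) ls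

def pvFillOCur (cur : Option String) : List (Option String) → Option String
  | [] => cur
  | lab :: labs => pvFillOCur (pvUpd cur lab) labs

-- the carried label after scanning a list of lines
def pvFillCurL (m : String → Option String) : Option String → List String → Option String
  | cur, [] => cur
  | cur, l :: ls => pvFillCurL m (pvUpd cur (m l)) ls

-- (label, line) pairs of the labelled lines
def pvQ (P : List (String × Option String)) : List (String × String) :=
  P.filterMap (fun p => p.2.map (fun c => (c, p.1)))

theorem pv_find_eq (items : List (String × String)) (ln : String) :
    (items.find? (fun p => p.1 != "" && PySem.Str.isIn p.1 ln)).map (·.2)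
      = pvFirstMatchA items ln := by
  induction items with
  | nil => rfl
  | cons p rest ih =>
      obtain ⟨k, v⟩ := p
      by_cases h : (k != "" && PySem.Str.isIn k ln) = true
      · simp only [PySem.Str.isIn] at h
        simp [pvFirstMatchA, List.find?, h, PySem.Str.isIn]
      · simp only [Bool.not_eq_true, PySem.Str.isIn] at h ih
        simp [pvFirstMatchA, List.find?, h, PySem.Str.isIn, ih]

theorem pv_label_eq (items : List (String × String)) :
    pvLabelB items = fun line => pvFirstMatchA items (PySem.Str.lower (PySem.Str.strip line)) :=
  funext fun line => pv_find_eq items (PySem.Str.lower (PySem.Str.strip line))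

-- grouping step shared by the characterisations below
def pvBucketStep (d : PySem.Dict String (List String)) (p : String × Option String) :
    PySem.Dict String (List String) :=
  match p.2 with
  | some lab => d.modify lab [] (fun ls => ls ++ [p.1])
  | none => d

theorem pv_loopA (items : List (String × String)) (L : List String) :
    ∀ (d : PySem.Dict String (List String)) (cur : Option String),
    L.foldl (pvStepA items) (d, cur)
      = ((pvFill (fun line => pvFirstMatchA items (PySem.Str.lower (PySem.Str.strip line))) cur L).foldl
           pvBucketStep d,
         pvFillOCur cur (L.map (fun line => pvFirstMatchA items (PySem.Str.lower (PySem.Str.strip line))))) := by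
  induction L with
  | nil => intro d cur; rfl
  | cons l ls ih =>
      intro d cur
      rw [List.foldl_cons, List.map_cons]
      cases h : pvFirstMatchA items (PySem.Str.lower (PySem.Str.strip l)) with
      | some c =>
          have hstep : pvStepA items (d, cur) l
              = (pvBucketStep d (l, some c), some c) := by
            simp [pvStepA, pvBucketStep, h]
          rw [hstep, ih]
          simp [pvFill, pvFillOCur, pvUpd, h]
      | none =>
          cases cur with
          | some c =>
              have hstep : pvStepA items (d, some c) l
                  = (pvBucketStep d (l, some c), some c) := by
                simp [pvStepA, pvBucketStep, h]
              rw [hstep, ih]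
              simp [pvFill, pvFillOCur, pvUpd, h]
          | none =>
              have hstep : pvStepA items (d, none) l = (pvBucketStep d (l, none), none) := by
                simp [pvStepA, pvBucketStep, h]
              rw [hstep, ih]
              simp [pvFill, pvFillOCur, pvUpd, h]

theorem pv_bucket_eq_Q (P : List (String × Option String)) :
    ∀ (d : PySem.Dict String (List String)),
    P.foldl pvBucketStep d
      = (pvQ P).foldl (fun d p => d.modify p.1 [] (fun x => x ++ [p.2])) d := by
  induction P with
  | nil => intro d; rfl
  | cons p ps ih =>
      intro d
      obtain ⟨l, lab⟩ := p
      cases lab <;> simp [pvQ, pvBucketStep, List.foldl_cons, ih]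

theorem pv_getD_init (xs : List String) :
    ∀ (d : PySem.Dict String (List String)), (∀ k, d.getD k [] = []) →
    ∀ k, (xs.foldl (fun d s => d.insert s ([] : List String)) d).getD k [] = [] := by
  induction xs with
  | nil => intro d h k; exact h k
  | cons x xs ih =>
      intro d h k
      rw [List.foldl_cons]
      refine ih _ (fun k' => ?_) k
      rw [PySem.Dict.getD_insert]
      split
      · rfl
      · exact h k'

theorem pv_update_of_subset (xs : List String) :
    ∀ (s : PySem.Set String), (∀ x ∈ xs, x ∈ s) → PySem.Set.update s xs = s := by
  induction xs with
  | nil => intro s _; rfl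
  | cons x xs ih =>
      intro s h
      have hadd : PySem.Set.add s x = s := by
        simp [PySem.Set.add, PySem.Set.contains, h x (List.mem_cons_self ..)]
      have : PySem.Set.update s (x :: xs) = PySem.Set.update (PySem.Set.add s x) xs := rfl
      rw [this, hadd]
      exact ih s (fun y hy => h y (List.mem_cons_of_mem _ hy))

theorem pv_values_subset (xs : List String) :
    ∀ (d : PySem.Dict String String) (w : String),
    w ∈ (xs.foldl (fun d s => d.insert (PySem.Str.lower s) s) d).values → w ∈ xs ∨ w ∈ d.values := by
  induction xs with
  | nil => intro d w h; exact Or.inr h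
  | cons x xs ih =>
      intro d w h
      rw [List.foldl_cons] at h
      rcases ih _ w h with h1 | h2
      · exact Or.inl (List.mem_cons_of_mem _ h1)
      · rcases PySem.Dict.mem_values_insert _ _ _ _ h2 with rfl | h3
        · exact Or.inl (List.mem_cons_self ..)
        · exact Or.inr h3

theorem pv_firstMatch_mem (ln v : String) (items : List (String × String)) :
    pvFirstMatchA items ln = some v → v ∈ items.map (·.2) := by
  induction items with
  | nil => intro h; cases h
  | cons p rest ih =>
      obtain ⟨k, w⟩ := p
      intro h
      simp only [pvFirstMatchA] at h
      split at h
      · cases h; simp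
      · simpa using Or.inr (by simpa using ih h)

theorem pv_fill_label (m : String → Option String) (c : String) (L : List String) :
    ∀ (cur : Option String) (p : String × Option String),
    p ∈ pvFill m cur L → p.2 = some c → (∃ l, m l = some c) ∨ cur = some c := by
  induction L with
  | nil => intro cur p hp; cases hp
  | cons l ls ih =>
      intro cur p hp h2
      rcases List.mem_cons.mp hp with rfl | htail
      · cases hml : m l with
        | some x => left; exact ⟨l, by simp only [pvUpd, hml] at h2 ⊢; exact h2⟩
        | none => right; simp only [pvUpd, hml] at h2; exact h2
      · rcases ih (pvUpd cur (m l)) p htail h2 with h | h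
        · exact Or.inl h
        · cases hml : m l with
          | some x => left; exact ⟨l, by rw [hml]; rw [hml] at h; simpa [pvUpd] using h⟩
          | none => right; rw [hml] at h; simpa [pvUpd] using h

theorem pv_Q_fst (P : List (String × Option String)) (x : String) :
    x ∈ (pvQ P).map (·.1) → ∃ p ∈ P, p.2 = some x := by
  intro hx
  simp only [pvQ, List.map_filterMap, List.mem_filterMap] at hx
  obtain ⟨p, hp, hmap⟩ := hx
  cases h2 : p.2 with
  | none => rw [h2] at hmap; cases hmap
  | some c =>
      rw [h2] at hmap
      simp only [Option.map, Option.some.injEq] at hmap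
      exact ⟨p, hp, by rw [h2, hmap]⟩

theorem pv_foldl_insert_getD (g : String → String) (xs : List String) :
    ∀ (d : PySem.Dict String String) (k : String),
    (xs.foldl (fun d s => d.insert s (g s)) d).getD k ""
      = if k ∈ xs then g k else d.getD k "" := by
  induction xs with
  | nil => intro d k; simp
  | cons x xs ih =>
      intro d k
      rw [List.foldl_cons, ih]
      by_cases hk : k ∈ xs
      · simp [hk]
      · rw [PySem.Dict.getD_insert]
        by_cases hkx : k = x <;> simp [hk, hkx]

-- ---- joining lemmas ----

theorem pv_chars_join_append (sep : List Char) (xs ys : List (List Char))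
    (hx : xs ≠ []) (hy : ys ≠ []) :
    PySem.Chars.join sep (xs ++ ys)
      = PySem.Chars.join sep xs ++ sep ++ PySem.Chars.join sep ys := by
  induction xs with
  | nil => cases hx rfl
  | cons a xs ih =>
      cases xs with
      | nil =>
          cases ys with
          | nil => cases hy rfl
          | cons b ys => simp [PySem.Chars.join_cons_cons]
      | cons a' xs' =>
          have hstep := ih (by simp)
          rw [List.cons_append] at hstep
          rw [List.cons_append, List.cons_append,
            PySem.Chars.join_cons_cons, PySem.Chars.join_cons_cons, hstep]
          simp [List.append_assoc]

theorem pv_chars_join_flatten (sep : List Char) (segs : List (List (List Char)))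
    (h : ∀ s ∈ segs, s ≠ []) :
    PySem.Chars.join sep (segs.map (PySem.Chars.join sep))
      = PySem.Chars.join sep segs.flatten := by
  induction segs with
  | nil => rfl
  | cons s segs ih =>
      cases segs with
      | nil => simp [PySem.Chars.join_singleton]
      | cons s' segs' =>
          have hs : s ≠ [] := h s (List.mem_cons_self ..)
          have hfl : (s' :: segs').flatten ≠ [] := by
            have : s' ≠ [] := h s' (by simp)
            cases s' with
            | nil => cases this rfl
            | cons c cs => simp
          have hmap : (s' :: segs').map (PySem.Chars.join sep)
              = PySem.Chars.join sep s' :: segs'.map (PySem.Chars.join sep) := List.map_cons ..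
          rw [List.map_cons, hmap, PySem.Chars.join_cons_cons, ← hmap,
            ih (fun t ht => h t (List.mem_cons_of_mem _ ht))]
          rw [List.flatten_cons] at hfl
          rw [List.flatten_cons, ← pv_chars_join_append sep s (s' ++ segs'.flatten) hs hfl]
          simp [List.flatten_cons]

theorem pv_str_join_flatten (segs : List (List String))
    (h : ∀ s ∈ segs, s ≠ []) :
    PySem.Str.join "\n" (segs.map (PySem.Str.join "\n"))
      = PySem.Str.join "\n" segs.flatten := by
  apply String.toList_inj.mp
  have hm : (segs.map (PySem.Str.join "\n")).map String.toList
      = (segs.map (List.map String.toList)).map (PySem.Chars.join "\n".toList) := by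
    simp [List.map_map, Function.comp]
  rw [PySem.Str.toList_join, PySem.Str.toList_join, hm,
    pv_chars_join_flatten "\n".toList (segs.map (List.map String.toList))
      (by intro s hs; obtain ⟨t, ht, rfl⟩ := List.mem_map.mp hs
          exact fun hnil => h t ht (List.map_eq_nil_iff.mp hnil))]
  congr 1
  rw [← List.map_flatten]

-- ---- chunks characterise the forward-filled labelled lines ----

theorem pv_fill_append (m : String → Option String) (xs ys : List String) :
    ∀ (cur : Option String),
    pvFill m cur (xs ++ ys) = pvFill m cur xs ++ pvFill m (pvFillCurL m cur xs) ys := by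
  induction xs with
  | nil => intro cur; rfl
  | cons x xs ih => intro cur; simp [pvFill, pvFillCurL, ih]

theorem pv_fill_allNone (m : String → Option String) (xs : List String)
    (h : ∀ x ∈ xs, m x = none) :
    ∀ (cur : Option String),
    pvFill m cur xs = xs.map (fun l => (l, cur)) ∧ pvFillCurL m cur xs = cur := by
  induction xs with
  | nil => intro cur; exact ⟨rfl, rfl⟩
  | cons x xs ih =>
      intro cur
      have hx : m x = none := h x (List.mem_cons_self ..)
      have := ih (fun y hy => h y (List.mem_cons_of_mem _ hy)) cur
      simp [pvFill, pvFillCurL, pvUpd, hx, this.1, this.2]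

theorem pv_Q_append (P P' : List (String × Option String)) :
    pvQ (P ++ P') = pvQ P ++ pvQ P' := by
  simp [pvQ]

theorem pv_Q_none (xs : List String) :
    pvQ (xs.map (fun l => (l, (none : Option String)))) = [] := by
  simp [pvQ]

theorem pv_fillQ_cur_irrel (m : String → Option String) (L : List String)
    (h : L = [] ∨ ∃ h' t, L = h' :: t ∧ (m h').isSome) (cur : Option String) :
    pvQ (pvFill m cur L) = pvQ (pvFill m none L) := by
  rcases h with rfl | ⟨h', t, rfl, hs⟩
  · rfl
  · cases hm : m h' with
    | none => rw [hm] at hs; cases hs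
    | some k => simp [pvFill, pvUpd, hm]

theorem pv_dropWhile_head (m : String → Option String) (L : List String) :
    ∀ h' t, L.dropWhile (fun l => (m l).isNone) = h' :: t → (m h').isSome := by
  induction L with
  | nil => intro h' t h; cases h
  | cons x xs ih =>
      intro h' t h
      rw [List.dropWhile_cons] at h
      split at h
      · exact ih h' t h
      · next hx => cases h; rw [Option.isSome_iff_ne_none]; simpa using hx

theorem pv_dropWhile_shape (m : String → Option String) (L : List String) :
    L.dropWhile (fun l => (m l).isNone) = []
      ∨ ∃ h' t, L.dropWhile (fun l => (m l).isNone) = h' :: t ∧ (m h').isSome := by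
  cases h : L.dropWhile (fun l => (m l).isNone) with
  | nil => exact Or.inl rfl
  | cons h' t => exact Or.inr ⟨h', t, rfl, pv_dropWhile_head m L h' t h⟩

theorem pv_chunks_main (m : String → Option String) (L : List String) :
    pvQ (pvFill m none L)
      = (pvChunks m L).flatMap (fun c => c.2.map (fun l => (c.1, l))) := by
  induction hL : L.length using Nat.strong_induction_on generalizing L with
  | _ n ih =>
  subst hL
  have hpre := List.takeWhile_append_dropWhile (p := fun l => (m l).isNone) (l := L)
  have hpre_none : ∀ x ∈ L.takeWhile (fun l => (m l).isNone), m x = none := by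
    intro x hx
    have := List.mem_takeWhile_imp hx
    simpa using this
  rw [pvChunks]
  split
  · next hdrop =>
      have hall : ∀ x ∈ L, m x = none := by
        intro x hx
        have := List.dropWhile_eq_nil_iff.mp hdrop x hx
        simpa using this
      rw [(pv_fill_allNone m L hall none).1, pv_Q_none]
      rfl
  · next head rest hdrop =>
      have hhead : (m head).isSome := pv_dropWhile_head m L head rest hdrop
      obtain ⟨k, hk⟩ := Option.isSome_iff_exists.mp hhead
      -- decompose L = pre ++ head :: (body ++ rest')
      have hrest := List.takeWhile_append_dropWhile (p := fun l => (m l).isNone) (l := rest)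
      have hLdec : L = L.takeWhile (fun l => (m l).isNone)
          ++ (head :: (rest.takeWhile (fun l => (m l).isNone)
              ++ rest.dropWhile (fun l => (m l).isNone))) := by
        rw [hrest, ← hdrop, hpre]
      have hbody_none : ∀ x ∈ rest.takeWhile (fun l => (m l).isNone), m x = none := by
        intro x hx; simpa using List.mem_takeWhile_imp hx
      -- sizes for IH
      have hlen : (rest.dropWhile (fun l => (m l).isNone)).length < L.length := by
        have h1 : (rest.dropWhile (fun l => (m l).isNone)).length ≤ rest.length :=
          List.length_dropWhile_le ..
        have h2 : (head :: rest).length ≤ L.length := by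
          rw [← hdrop]; exact List.length_dropWhile_le ..
        simp only [List.length_cons] at h2
        omega
      -- compute pvQ (pvFill m none L)
      conv_lhs => rw [hLdec]
      rw [pv_fill_append]
      rw [(pv_fill_allNone m _ hpre_none none).1, (pv_fill_allNone m _ hpre_none none).2]
      rw [pv_Q_append, pv_Q_none, List.nil_append]
      have hfillcons : pvFill m none (head :: (rest.takeWhile (fun l => (m l).isNone)
          ++ rest.dropWhile (fun l => (m l).isNone)))
          = (head, some k) :: pvFill m (some k) (rest.takeWhile (fun l => (m l).isNone)
              ++ rest.dropWhile (fun l => (m l).isNone)) := by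
        simp [pvFill, pvUpd, hk]
      rw [hfillcons, pv_fill_append,
        (pv_fill_allNone m _ hbody_none (some k)).1,
        (pv_fill_allNone m _ hbody_none (some k)).2]
      have hQcons : pvQ ((head, some k) :: ((rest.takeWhile (fun l => (m l).isNone)).map
            (fun l => (l, some k))
          ++ pvFill m (some k) (rest.dropWhile (fun l => (m l).isNone))))
          = (k, head) :: ((rest.takeWhile (fun l => (m l).isNone)).map (fun l => (k, l))
            ++ pvQ (pvFill m (some k) (rest.dropWhile (fun l => (m l).isNone)))) := by
        simp [pvQ, List.filterMap_append, List.filterMap_map, Function.comp]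
      rw [hQcons,
        pv_fillQ_cur_irrel m _ (pv_dropWhile_shape m rest) (some k),
        ih _ hlen _ rfl]
      simp [hk, List.flatMap_cons]

theorem pv_chunks_snd_ne_nil (m : String → Option String) (L : List String) :
    ∀ c ∈ pvChunks m L, c.2 ≠ [] := by
  induction hL : L.length using Nat.strong_induction_on generalizing L with
  | _ n ih =>
  subst hL
  rw [pvChunks]
  split
  · intro c hc; cases hc
  · next head rest hdrop =>
      intro c hc
      have hlen : (rest.dropWhile (fun l => (m l).isNone)).length < L.length := by
        have h1 : (rest.dropWhile (fun l => (m l).isNone)).length ≤ rest.length :=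
          List.length_dropWhile_le ..
        have h2 : (head :: rest).length ≤ L.length := by
          rw [← hdrop]; exact List.length_dropWhile_le ..
        simp only [List.length_cons] at h2
        omega
      rcases List.mem_cons.mp hc with rfl | htail
      · simp
      · exact ih _ hlen _ rfl c htail

-- per-key value: the filtered flatMap collapses to filtered chunks
theorem pv_flatMap_filter (chs : List (String × List String)) (k : String) :
    (((chs.flatMap (fun c => c.2.map (fun l => (c.1, l)))).filter
        (fun p => p.1 == k)).map (·.2))
      = ((chs.filter (fun c => c.1 == k)).map (·.2)).flatten := by
  induction chs with
  | nil => rfl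
  | cons c chs ih =>
      rw [List.flatMap_cons, List.filter_append, List.map_append, ih]
      by_cases hk : c.1 = k
      · subst hk
        simp [List.filter_map, Function.comp]
      · have h1 : (c.2.map (fun l => (c.1, l))).filter (fun p => p.1 == k) = [] := by
          simp [List.filter_map, Function.comp, List.filter_eq_nil_iff, hk]
        simp [h1, hk]

-- the final per-key equality of the two result dicts
theorem pv_final (subjects : List String) (Q : List (String × String))
    (chs : List (String × List String))
    (hQ : ∀ x ∈ Q.map (·.1), x ∈ subjects)
    (hQchs : Q = chs.flatMap (fun c => c.2.map (fun l => (c.1, l))))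
    (hne : ∀ c ∈ chs, c.2 ≠ []) :
    ((Q.foldl (fun d p => d.modify p.1 [] (fun x => x ++ [p.2]))
        (subjects.foldl (fun d s => d.insert s ([] : List String)) PySem.Dict.empty)).items.map
      (fun p => (p.1, PySem.Str.strip (PySem.Str.join "\n" p.2))))
    = (subjects.foldl (fun d s =>
        d.insert s (PySem.Str.strip (PySem.Str.join "\n"
          ((chs.foldl (fun d c => d.modify c.1 [] (fun ls => ls ++ [PySem.Str.join "\n" c.2]))
            (subjects.foldl (fun d s => d.insert s ([] : List String)) PySem.Dict.empty)).getD s []))))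
        PySem.Dict.empty).items := by
  have hupd0 : ∀ (l : List String), PySem.Set.update ([] : PySem.Set String) l = PySem.Set.ofList l := by
    intro l; rw [PySem.Set.ofList_eq_foldl]; rfl
  have hS0keys : (subjects.foldl (fun d s => d.insert s ([] : List String)) PySem.Dict.empty).keys
      = PySem.Set.ofList subjects := by
    rw [PySem.Dict.keys_foldl_insert subjects (fun _ _ => ([] : List String)) PySem.Dict.empty,
      PySem.Dict.keys_empty, hupd0]
  have hLkeys : (Q.foldl (fun d p => d.modify p.1 [] (fun x => x ++ [p.2]))
      (subjects.foldl (fun d s => d.insert s ([] : List String)) PySem.Dict.empty)).keys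
      = PySem.Set.ofList subjects := by
    rw [PySem.Dict.keys_foldl_modify_key Q Prod.fst [] (fun _ p => fun x => x ++ [p.2]), hS0keys]
    exact pv_update_of_subset _ _ (fun x hx => by
      simpa [PySem.Set.mem_ofList] using hQ x hx)
  have hRkeys : (subjects.foldl (fun d s =>
      d.insert s (PySem.Str.strip (PySem.Str.join "\n"
        ((chs.foldl (fun d c => d.modify c.1 [] (fun ls => ls ++ [PySem.Str.join "\n" c.2]))
          (subjects.foldl (fun d s => d.insert s ([] : List String)) PySem.Dict.empty)).getD s []))))
      PySem.Dict.empty).keys = PySem.Set.ofList subjects := by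
    rw [PySem.Dict.keys_foldl_insert subjects _ PySem.Dict.empty, PySem.Dict.keys_empty, hupd0]
  have hnd : (PySem.Set.ofList subjects).Nodup := PySem.Set.nodup_ofList subjects
  rw [PySem.Dict.items_eq_map_keys _ (by rw [hLkeys]; exact hnd) ([] : List String),
    PySem.Dict.items_eq_map_keys _ (by rw [hRkeys]; exact hnd) ("" : String),
    hLkeys, hRkeys, List.map_map]
  refine List.map_congr_left (fun k hk => ?_)
  have hL : (Q.foldl (fun d p => d.modify p.1 [] (fun x => x ++ [p.2]))
      (subjects.foldl (fun d s => d.insert s ([] : List String)) PySem.Dict.empty)).getD k []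
      = (Q.filter (fun p => p.1 == k)).map (·.2) := by
    rw [PySem.Dict.getD_foldl_modify_append,
      pv_getD_init subjects PySem.Dict.empty (fun _ => by simp) k, List.nil_append]
  have hchsfold : chs.foldl (fun d c => d.modify c.1 [] (fun ls => ls ++ [PySem.Str.join "\n" c.2]))
        (subjects.foldl (fun d s => d.insert s ([] : List String)) PySem.Dict.empty)
      = (chs.map (fun c => (c.1, PySem.Str.join "\n" c.2))).foldl
          (fun d p => d.modify p.1 [] (fun ls => ls ++ [p.2]))
          (subjects.foldl (fun d s => d.insert s ([] : List String)) PySem.Dict.empty) := by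
    rw [List.foldl_map]
  have hP : (chs.foldl (fun d c => d.modify c.1 [] (fun ls => ls ++ [PySem.Str.join "\n" c.2]))
        (subjects.foldl (fun d s => d.insert s ([] : List String)) PySem.Dict.empty)).getD k []
      = ((chs.filter (fun c => c.1 == k)).map (·.2)).map (PySem.Str.join "\n") := by
    rw [hchsfold, PySem.Dict.getD_foldl_modify_append,
      pv_getD_init subjects PySem.Dict.empty (fun _ => by simp) k, List.nil_append,
      List.filter_map, List.map_map]
    simp only [List.map_map, Function.comp_def]
  have hRg : (subjects.foldl (fun d s =>
      d.insert s (PySem.Str.strip (PySem.Str.join "\n"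
        ((chs.foldl (fun d c => d.modify c.1 [] (fun ls => ls ++ [PySem.Str.join "\n" c.2]))
          (subjects.foldl (fun d s => d.insert s ([] : List String)) PySem.Dict.empty)).getD s []))))
      PySem.Dict.empty).getD k ""
      = PySem.Str.strip (PySem.Str.join "\n"
          (((chs.filter (fun c => c.1 == k)).map (·.2)).map (PySem.Str.join "\n"))) := by
    rw [pv_foldl_insert_getD, if_pos (by simpa [PySem.Set.mem_ofList] using hk), hP]
  simp only [Function.comp, hL, hRg]
  rw [pv_str_join_flatten _ (by
      intro s hs
      obtain ⟨c, hc, rfl⟩ := List.mem_map.mp hs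
      exact hne c (List.mem_filter.mp hc).1),
    ← pv_flatMap_filter chs k, ← hQchs]

-- ===== VERDICT (by name: the statement is the Claim_ definition above) =====
theorem extract_subject_sections_spec : Claim_equal_extract_subject_sections := by
  intro text subjects _
  show extract_subject_sections text subjects = extract_subject_sections_alt text subjects
  simp only [extract_subject_sections, extract_subject_sections_alt, pv_label_eq]
  rw [pv_loopA, pv_bucket_eq_Q]
  set m := fun line => pvFirstMatchA
    ((subjects.foldl (fun d s => d.insert (PySem.Str.lower s) s) PySem.Dict.empty).items)
    (PySem.Str.lower (PySem.Str.strip line)) with hm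
  refine pv_final subjects _ (pvChunks m (PySem.Str.splitlines text)) (fun x hx => ?_)
    (pv_chunks_main m (PySem.Str.splitlines text))
    (pv_chunks_snd_ne_nil m (PySem.Str.splitlines text))
  obtain ⟨p, hp, h2⟩ := pv_Q_fst _ x hx
  rcases pv_fill_label _ x _ none p hp h2 with ⟨l, hl⟩ | hcur
  · have hv := pv_firstMatch_mem _ x _ hl
    rcases pv_values_subset subjects PySem.Dict.empty x (by simpa [PySem.Dict.values] using hv) with h | h
    · exact h
    · simp [PySem.Dict.values, PySem.Dict.empty] at h
  · cases hcur
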